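-- pv_equiv track=rewrite | github.com/an10nimus/MyCodeForces | Round_640_Div_4/A/A.py | solve
-- ===== SOURCE A (Python) =====
-- def solve(n):
--     ans = []
--     while n > 0:
--         n_str = str(n)
--         new_num = int(n_str[0])*10**(len(n_str)-1)
--         ans.append(str(new_num))
--         n = n - new_num
--     return ans
-- ===== SOURCE B (Python) =====
-- def solve(n):
--     if n <= 0:
--         return []
--     s = str(n)
--     L = len(s)
--     return [str(int(d) * 10 ** (L - 1 - i)) for i, d in enumerate(s) if d != '0']
-- ===== Notes on version B (the rewrite author's own statement) =====
-- stated objective: simpler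
-- what changed: B computes str(n) once and emits one round number per nonzero digit in a single forward pass over the digit string, instead of A's loop that restringifies n and subtracts the leading round number on every iteration.
import Mathlib
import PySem

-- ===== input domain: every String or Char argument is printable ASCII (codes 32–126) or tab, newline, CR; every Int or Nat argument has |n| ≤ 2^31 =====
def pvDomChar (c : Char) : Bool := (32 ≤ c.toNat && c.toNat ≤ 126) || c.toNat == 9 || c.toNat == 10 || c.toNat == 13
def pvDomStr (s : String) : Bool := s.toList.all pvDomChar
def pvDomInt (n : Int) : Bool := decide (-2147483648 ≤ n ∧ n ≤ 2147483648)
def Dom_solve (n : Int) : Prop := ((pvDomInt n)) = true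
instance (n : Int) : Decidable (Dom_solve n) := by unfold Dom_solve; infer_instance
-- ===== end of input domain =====

-- B replaces A's repeated restringify-and-subtract loop with a single pass over the digits of str(n); objective: simpler.

-- ===== PORT A =====
-- A's while loop as a fuel recursion: each iteration subtracts new_num ≥ 1, so n.toNat iterations always suffice.
-- int(n_str[0]): index 0 is in range (n > 0 ⇒ str(n) nonempty) and a decimal digit char always parses,
-- so the total forms pyGetD/getD are exact here; 10**(len-1) has a nonnegative exponent since len ≥ 1.
def solveLoop (fuel : Nat) (n : Int) (ans : List String) : List String :=
  match fuel with
  | 0 => ans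
  | f + 1 =>
    if n > 0 then
      let n_str := PySem.Int.toChars n
      let new_num : Int :=
        (PySem.Int.ofChars? [PySem.List.pyGetD n_str 0 ' ']).getD 0 * 10 ^ (n_str.length - 1)
      solveLoop f (n - new_num) (ans ++ [PySem.Int.toStr new_num])
    else ans

def solve (n : Int) : List String := solveLoop n.toNat n []

-- ===== PORT B =====
-- int(d) for a digit char always parses, so .getD 0 is exact; the exponent L-1-i is nonnegative since i < L,
-- so the truncating .toNat is exact.
def solve_alt (n : Int) : List String :=
  if n ≤ 0 then []
  else
    let s := PySem.Int.toChars n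
    let L : Int := PySem.List.len s
    ((PySem.List.enumerate s).filter (fun p => p.2 != '0')).map
      (fun p => PySem.Int.toStr ((PySem.Int.ofChars? [p.2]).getD 0 * 10 ^ (L - 1 - p.1).toNat))

-- ===== PRECONDITION & SPEC =====
def Spec_solve (n : Int) (out : List String) : Prop := out = solve_alt n
instance (n : Int) (out : List String) : Decidable (Spec_solve n out) := by unfold Spec_solve; infer_instance

-- ===== CLAIM (what is proved, stated in full; the proofs are below) =====
def Claim_equal_solve : Prop := ∀ (n : Int), Dom_solve n → Spec_solve n (solve n)

-- ===== LEMMAS AND PROOFS =====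

-- Common shape: emit the round numbers of a big-endian digit list (head = most significant digit).
def emitG : List Nat → List String
  | [] => []
  | d :: bd =>
    if d ≠ 0 then PySem.Int.toStr ((d : Int) * 10 ^ bd.length) :: emitG bd else emitG bd

-- Value of a big-endian digit list.
def valB : List Nat → Nat
  | [] => 0
  | d :: bd => d * 10 ^ bd.length + valB bd

theorem valB_lt {bd : List Nat} (h : ∀ x ∈ bd, x < 10) : valB bd < 10 ^ bd.length := by
  induction bd with
  | nil => simp [valB]
  | cons d bd ih =>
    have hd : d < 10 := h d (by simp)
    have hb : valB bd < 10 ^ bd.length := ih (fun x hx => h x (by simp [hx]))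
    have : (d + 1) * 10 ^ bd.length ≤ 10 ^ (bd.length + 1) := by
      have : d + 1 ≤ 10 := by omega
      calc (d + 1) * 10 ^ bd.length ≤ 10 * 10 ^ bd.length :=
            Nat.mul_le_mul_right _ this
        _ = 10 ^ (bd.length + 1) := by ring
    simp only [valB, List.length_cons]
    calc d * 10 ^ bd.length + valB bd < d * 10 ^ bd.length + 10 ^ bd.length := by omega
      _ = (d + 1) * 10 ^ bd.length := by ring
      _ ≤ 10 ^ (bd.length + 1) := this

theorem valB_eq_ofDigits_reverse (bd : List Nat) : valB bd = Nat.ofDigits 10 bd.reverse := by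
  induction bd with
  | nil => simp [valB]
  | cons d bd ih =>
    simp [valB, ih, Nat.ofDigits_append, Nat.ofDigits_singleton]
    ring

-- str(n) for n > 0, as the reversed little-endian digits rendered as chars.
theorem toDigitsCore_eq (f : Nat) : ∀ n ds, n ≠ 0 → n < f →
    Nat.toDigitsCore 10 f n ds = (Nat.digits 10 n).reverse.map Nat.digitChar ++ ds := by
  induction f with
  | zero => intro n ds h hf; omega
  | succ f ih =>
    intro n ds h hf
    rw [Nat.toDigitsCore]
    by_cases h10 : n / 10 = 0
    · have hn : n < 10 := by omega
      rw [if_pos h10, Nat.digits_def' (by norm_num : (1:Nat) < 10) (by omega), h10]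
      simp [Nat.mod_eq_of_lt hn]
    · rw [if_neg h10]
      have hlt : n / 10 < f := by
        have : n / 10 < n := Nat.div_lt_self (by omega) (by norm_num)
        omega
      rw [ih (n / 10) _ h10 hlt,
        show Nat.digits 10 n = n % 10 :: Nat.digits 10 (n / 10) from
          Nat.digits_def' (by norm_num) (by omega)]
      simp only [List.reverse_cons, List.map_append, List.map_cons, List.map_nil,
        List.append_assoc, List.singleton_append]

theorem toChars_pos (m : Nat) (h : 0 < m) :
    PySem.Int.toChars (m : Int) = (Nat.digits 10 m).reverse.map Nat.digitChar := by
  rw [PySem.Int.toChars]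
  rw [if_neg (by omega)]
  simp only [Int.toNat_natCast]
  rw [Nat.toDigits, toDigitsCore_eq (m + 1) m [] (by omega) (by omega)]
  simp

theorem ofChars_digitChar {d : Nat} (h : d < 10) :
    PySem.Int.ofChars? [Nat.digitChar d] = some (d : Int) := by
  interval_cases d <;> decide

-- digits of d*10^k + r when 1 ≤ d < 10 and r < 10^k: r's digits, zero padding, then d.
theorem digits_decomp {d r k : Nat} (hd0 : d ≠ 0) (hd : d < 10) (hr : r < 10 ^ k) :
    Nat.digits 10 (d * 10 ^ k + r) =
      (Nat.digits 10 r ++ List.replicate (k - (Nat.digits 10 r).length) 0) ++ [d] := by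
  have hlen : (Nat.digits 10 r).length ≤ k := by
    rcases Nat.eq_zero_or_pos r with hr0 | hr0
    · simp [hr0]
    · have hlog : Nat.log 10 r < k := Nat.log_lt_of_lt_pow (by omega) hr
      rw [Nat.length_digits 10 r (by norm_num) (by omega)]
      omega
  have hof : Nat.ofDigits 10 ((Nat.digits 10 r ++ List.replicate (k - (Nat.digits 10 r).length) 0) ++ [d])
      = d * 10 ^ k + r := by
    rw [Nat.ofDigits_append, Nat.ofDigits_append, Nat.ofDigits_digits,
      Nat.ofDigits_replicate_zero, Nat.ofDigits_singleton]
    simp [List.length_append, List.length_replicate, Nat.add_sub_cancel' hlen]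
    ring
  have := Nat.digits_ofDigits 10 (by norm_num)
    ((Nat.digits 10 r ++ List.replicate (k - (Nat.digits 10 r).length) 0) ++ [d])
    (by
      intro l hl
      rcases List.mem_append.mp hl with hl | hl
      · rcases List.mem_append.mp hl with hl | hl
        · exact Nat.digits_lt_base (by norm_num) hl
        · have := List.eq_of_mem_replicate hl; omega
      · simp at hl; omega)
    (by
      intro hne
      rw [List.getLast_append]
      · simpa using hd0)
  rw [← hof, this]

-- The reversed char string of d*10^k + r: leading digit d, then padding zeros, then r's digits.
theorem toChars_decomp {d r k : Nat} (hd0 : d ≠ 0) (hd : d < 10) (hr : r < 10 ^ k) :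
    PySem.Int.toChars ((d * 10 ^ k + r : Nat) : Int) =
      Nat.digitChar d ::
        ((List.replicate (k - (Nat.digits 10 r).length) 0 ++ (Nat.digits 10 r).reverse).map Nat.digitChar) := by
  rw [toChars_pos _ (by positivity), digits_decomp hd0 hd hr]
  simp

-- A's loop computes emitG on any big-endian digit list of its argument.
theorem solveLoop_emitG : ∀ bd : List Nat, (∀ x ∈ bd, x < 10) →
    ∀ fuel, valB bd ≤ fuel → ∀ ans,
      solveLoop fuel ((valB bd : Nat) : Int) ans = ans ++ emitG bd := by
  intro bd
  induction bd with
  | nil => intro _ fuel _ ans; cases fuel <;> simp [solveLoop, valB, emitG]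
  | cons d bd ih =>
    intro hall fuel hfuel ans
    have hd : d < 10 := hall d (by simp)
    have hbd : ∀ x ∈ bd, x < 10 := fun x hx => hall x (by simp [hx])
    have hrlt : valB bd < 10 ^ bd.length := valB_lt hbd
    by_cases hd0 : d = 0
    · subst hd0
      have h1 : valB (0 :: bd) = valB bd := by simp [valB]
      have h2 : emitG (0 :: bd) = emitG bd := by simp [emitG]
      rw [h1] at hfuel ⊢
      rw [h2]
      exact ih hbd fuel hfuel ans
    · have hval : valB (d :: bd) = d * 10 ^ bd.length + valB bd := rfl
      have hpos : 0 < valB (d :: bd) := by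
        rw [hval]; have : 0 < 10 ^ bd.length := by positivity
        have : 1 * 10 ^ bd.length ≤ d * 10 ^ bd.length := Nat.mul_le_mul_right _ (by omega)
        omega
      obtain ⟨f, rfl⟩ : ∃ f, fuel = f + 1 := ⟨fuel - 1, by omega⟩
      rw [solveLoop]
      rw [if_pos (by exact_mod_cast hpos)]
      have hchars := toChars_decomp hd0 hd hrlt
      rw [hval]
      simp only [hchars]
      have hlen : (Nat.digitChar d ::
          ((List.replicate (bd.length - (Nat.digits 10 (valB bd)).length) 0 ++ (Nat.digits 10 (valB bd)).reverse).map Nat.digitChar)).length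
          = bd.length + 1 := by
        have hlenr : (Nat.digits 10 (valB bd)).length ≤ bd.length := by
          rcases Nat.eq_zero_or_pos (valB bd) with h0 | h0
          · simp [h0]
          · have hlog : Nat.log 10 (valB bd) < bd.length := Nat.log_lt_of_lt_pow (by omega) hrlt
            rw [Nat.length_digits 10 _ (by norm_num) (by omega)]; omega
        simp [List.length_append, List.length_replicate]
        omega
      rw [hlen]
      simp only [PySem.List.pyGetD_zero_cons, ofChars_digitChar hd, Option.getD_some,
        Nat.add_sub_cancel]
      have harith : ((d * 10 ^ bd.length + valB bd : Nat) : Int) - (d : Int) * 10 ^ bd.length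
          = ((valB bd : Nat) : Int) := by push_cast; ring
      rw [harith]
      have hfuel' : valB bd ≤ f := by
        have : 1 * 10 ^ bd.length ≤ d * 10 ^ bd.length := Nat.mul_le_mul_right _ (by omega)
        have h1 : 0 < 10 ^ bd.length := by positivity
        simp only [valB] at hfuel
        omega
      rw [ih hbd f hfuel' _]
      simp [emitG, hd0]

-- B's comprehension over the enumerated digit chars (offset j, total length j + bd.length) is emitG.
theorem comprehension_emitG : ∀ (bd : List Nat) (j L : Int), (∀ x ∈ bd, x < 10) →
    L = j + bd.length →
    ((PySem.List.enumerate (bd.map Nat.digitChar) j).filter (fun p => p.2 != '0')).map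
        (fun p => PySem.Int.toStr ((PySem.Int.ofChars? [p.2]).getD 0 * 10 ^ (L - 1 - p.1).toNat))
      = emitG bd := by
  intro bd
  induction bd with
  | nil => intro j L _ _; simp [emitG]
  | cons d bd ih =>
    intro j L hall hL
    have hd : d < 10 := hall d (by simp)
    have hbd : ∀ x ∈ bd, x < 10 := fun x hx => hall x (by simp [hx])
    have hexp : (L - 1 - j).toNat = bd.length := by
      rw [hL]; simp only [List.length_cons]; push_cast; omega
    have hrest := ih (j + 1) L hbd (by rw [hL]; simp only [List.length_cons]; push_cast; ring)
    simp only [List.map_cons, PySem.List.enumerate, List.filter_cons]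
    by_cases hd0 : d = 0
    · subst hd0
      simp only [show (Nat.digitChar 0 != '0') = false by decide, Bool.false_eq_true, if_false]
      rw [hrest]
      simp [emitG]
    · have hne : (Nat.digitChar d != '0') = true := by
        interval_cases d <;> first | (exfalso; exact hd0 rfl) | decide
      simp only [hne, if_true]
      simp only [List.map_cons, ofChars_digitChar hd, Option.getD_some, hexp]
      rw [hrest]
      simp [emitG, hd0]

theorem valB_reverse_digits (m : Nat) : valB (Nat.digits 10 m).reverse = m := by
  rw [valB_eq_ofDigits_reverse]
  simp [Nat.ofDigits_digits]

-- ===== VERDICT (by name: the statement is the Claim_ definition above) =====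
theorem solve_spec : Claim_equal_solve := by
  intro n _
  unfold Spec_solve solve solve_alt
  by_cases hn : n ≤ 0
  · rw [if_pos hn]
    have : n.toNat = 0 := by omega
    rw [this]
    simp [solveLoop]
  · rw [if_neg hn]
    obtain ⟨m, rfl⟩ : ∃ m : Nat, n = (m : Int) := ⟨n.toNat, by omega⟩
    have hm : 0 < m := by omega
    set bd := (Nat.digits 10 m).reverse with hbd
    have hall : ∀ x ∈ bd, x < 10 := by
      intro x hx
      exact Nat.digits_lt_base (by norm_num) (List.mem_reverse.mp hx)
    have hval : valB bd = m := valB_reverse_digits m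
    have hA : solveLoop (m : Int).toNat (m : Int) [] = [] ++ emitG bd := by
      have := solveLoop_emitG bd hall (m : Int).toNat (by simp [hval]) []
      rw [hval] at this
      simpa using this
    rw [hA]
    have hchars : PySem.Int.toChars (m : Int) = bd.map Nat.digitChar := by
      rw [toChars_pos m hm, hbd]
    rw [hchars]
    have hB := comprehension_emitG bd 0 (PySem.List.len (bd.map Nat.digitChar))
      hall (by simp [PySem.List.len_eq])
    rw [hB]
    simp
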